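-- pv_equiv track=rewrite | github.com/daggn3/CA117---programming-2 | CA117/wordcomps_031.py | moste
-- ===== SOURCE A (Python) =====
-- def moste(word):
-- 	b = []
-- 	most = 0
-- 	for s in word:
-- 		e = s.lower().count("e")
-- 		if e > most:
-- 			most = e
--
-- 	list = []
-- 	for s in word:
-- 		if s.lower().count("e") == most:
-- 			b.append(s)
-- 	return b
-- ===== SOURCE B (Python) =====
-- def moste(word):
--     most = 0
--     b = []
--     for s in word:
--         e = s.lower().count("e")
--         if e > most:
--             most = e
--             b = [s]
--         elif e == most:
--             b.append(s)
--     return b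
-- ===== Notes on version B (the rewrite author's own statement) =====
-- stated objective: alternative
-- what changed: B is a single pass that maintains the current best list, resetting it to [s] whenever a strictly larger e-count appears and appending on ties, instead of A's two full passes (a max-finding pass then a filtering pass, each recounting 'e').
import Mathlib
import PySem

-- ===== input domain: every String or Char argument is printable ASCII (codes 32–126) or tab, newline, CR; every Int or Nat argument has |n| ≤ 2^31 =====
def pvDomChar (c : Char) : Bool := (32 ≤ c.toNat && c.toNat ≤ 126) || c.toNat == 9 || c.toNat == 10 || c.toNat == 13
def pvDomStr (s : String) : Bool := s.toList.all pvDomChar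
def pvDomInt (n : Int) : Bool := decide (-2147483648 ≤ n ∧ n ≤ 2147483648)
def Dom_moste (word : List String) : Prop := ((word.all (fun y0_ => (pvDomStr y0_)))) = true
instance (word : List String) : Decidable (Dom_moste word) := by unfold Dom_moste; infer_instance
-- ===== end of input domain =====

-- B collects the winners in a single pass (reset the list on a new strict max, append on ties) instead of A's two passes.


-- the e-count of a word, shared notation for both ports
def eCnt (s : String) : Int := (PySem.Str.count (PySem.Str.lower s) "e" : Int)

-- ===== PORT A =====
def moste (word : List String) : List String :=
  let most : Int := word.foldl (fun most s =>
    let e : Int := eCnt s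
    if e > most then e else most) 0
  word.foldl (fun b s =>
    if eCnt s == most then b ++ [s] else b) []

-- ===== PORT B =====
def mosteGo (l : List String) (most : Int) (b : List String) : List String :=
  match l with
  | [] => b
  | s :: t =>
      let e : Int := eCnt s
      if e > most then mosteGo t e [s]
      else if e == most then mosteGo t most (b ++ [s])
      else mosteGo t most b

def moste_alt (word : List String) : List String := mosteGo word 0 []

-- ===== PRECONDITION & SPEC =====
def Spec_moste (word : List String) (out : List String) : Prop := out = moste_alt word
instance (word : List String) (out : List String) : Decidable (Spec_moste word out) := by unfold Spec_moste; infer_instance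

-- ===== CLAIM (what is proved, stated in full; the proofs are below) =====
def Claim_equal_moste : Prop := ∀ (word : List String), Dom_moste word → Spec_moste word (moste word)

-- ===== LEMMAS AND PROOFS =====

theorem le_foldl_max (l : List Int) (a : Int) : a ≤ l.foldl max a := by
  induction l generalizing a with
  | nil => exact le_refl a
  | cons x t ih => exact le_trans (le_max_left a x) (ih (max a x))

-- A's running-max loop is foldl max over the mapped counts
theorem foldl_if_gt_eq_foldl_max (l : List String) (a : Int) :
    l.foldl (fun m s => let e := eCnt s; if e > m then e else m) a
      = (l.map eCnt).foldl max a := by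
  induction l generalizing a with
  | nil => rfl
  | cons x t ih =>
      simp only [List.foldl, List.map]
      rw [ih]
      congr 1
      by_cases h : eCnt x > a
      · simp [h, max_eq_right (le_of_lt h)]
      · simp [h, max_eq_left (not_lt.mp h)]

-- the one-pass loop computes the filter at the overall max
theorem mosteGo_spec (l : List String) (m : Int) (b : List String) :
    mosteGo l m b
      = (if (l.map eCnt).foldl max m > m then [] else b)
          ++ l.filter (fun s => eCnt s == (l.map eCnt).foldl max m) := by
  induction l generalizing m b with
  | nil => simp [mosteGo]
  | cons x t ih =>
      simp only [mosteGo, List.map, List.foldl, List.filter_cons]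
      by_cases h1 : eCnt x > m
      · rw [if_pos h1, ih]
        have hmax : max m (eCnt x) = eCnt x := max_eq_right (le_of_lt h1)
        simp only [hmax]
        have hge : eCnt x ≤ (t.map eCnt).foldl max (eCnt x) := le_foldl_max _ _
        rw [if_pos (lt_of_lt_of_le h1 hge)]
        by_cases h2 : (t.map eCnt).foldl max (eCnt x) > eCnt x
        · have hne : (eCnt x == (t.map eCnt).foldl max (eCnt x)) = false := by
            simp only [beq_eq_false_iff_ne, ne_eq]; omega
          rw [if_pos h2, hne]
          simp
        · have heq : (t.map eCnt).foldl max (eCnt x) = eCnt x :=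
            le_antisymm (not_lt.mp h2) hge
          have hb : (eCnt x == (t.map eCnt).foldl max (eCnt x)) = true := by
            rw [heq]; simp
          rw [if_neg h2, hb]
          simp
      · rw [if_neg h1]
        have hle : eCnt x ≤ m := not_lt.mp h1
        have hmax : max m (eCnt x) = m := max_eq_left hle
        simp only [hmax]
        have hge : m ≤ (t.map eCnt).foldl max m := le_foldl_max _ _
        by_cases h2 : (eCnt x == m) = true
        · rw [if_pos h2, ih]
          have hxm : eCnt x = m := beq_iff_eq.mp h2
          by_cases h3 : (t.map eCnt).foldl max m > m
          · have hne : (eCnt x == (t.map eCnt).foldl max m) = false := by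
              simp only [beq_eq_false_iff_ne, ne_eq]; omega
            rw [if_pos h3, if_pos h3, hne]
            simp
          · have heq : (t.map eCnt).foldl max m = m := le_antisymm (not_lt.mp h3) hge
            have hb : (eCnt x == (t.map eCnt).foldl max m) = true := by rw [heq]; exact h2
            rw [if_neg h3, if_neg h3, hb]
            simp
        · rw [if_neg h2, ih]
          have hxm : eCnt x ≠ m := by simpa using h2
          have hne : (eCnt x == (t.map eCnt).foldl max m) = false := by
            simp only [beq_eq_false_iff_ne, ne_eq]
            by_cases h3 : (t.map eCnt).foldl max m > m
            · omega
            · have : (t.map eCnt).foldl max m = m := le_antisymm (not_lt.mp h3) hge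
              omega
          rw [hne]
          simp

-- ===== VERDICT (by name: the statement is the Claim_ definition above) =====
theorem moste_spec : Claim_equal_moste := by
  intro word _
  unfold Spec_moste moste moste_alt
  simp only []
  rw [foldl_if_gt_eq_foldl_max, PySem.List.foldl_append_if_eq_filter, mosteGo_spec]
  simp
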